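-- pv_equiv track=rewrite | github.com/Doug-13/Futstatistic | pages/3_Dados por Campeonato.py | highlight_rows
-- ===== SOURCE A (Python) =====
-- def highlight_rows(s):
--     styles = []
--     for i in range(len(s)):
--         if i < 6:
--             styles.append('background-color: rgba(93, 178, 48, 0.3);')
--         elif i >= len(s) - 4:
--             styles.append('background-color: rgba(243, 9, 9, 0.3)')
--         else:
--             styles.append('')
--     return styles
-- ===== SOURCE B (Python) =====
-- def highlight_rows(s):
--     n = len(s)
--     green = 'background-color: rgba(93, 178, 48, 0.3);'
--     red = 'background-color: rgba(243, 9, 9, 0.3)'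
--     return [green] * min(6, n) + [''] * (n - 10) + [red] * (n - max(6, n - 4))
-- ===== Notes on version B (the rewrite author's own statement) =====
-- stated objective: simpler
-- what changed: Replaces the per-index conditional loop by constructing the result as three concatenated constant blocks (green prefix, empty middle, red suffix) computed from len(s) alone.
import Mathlib
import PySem

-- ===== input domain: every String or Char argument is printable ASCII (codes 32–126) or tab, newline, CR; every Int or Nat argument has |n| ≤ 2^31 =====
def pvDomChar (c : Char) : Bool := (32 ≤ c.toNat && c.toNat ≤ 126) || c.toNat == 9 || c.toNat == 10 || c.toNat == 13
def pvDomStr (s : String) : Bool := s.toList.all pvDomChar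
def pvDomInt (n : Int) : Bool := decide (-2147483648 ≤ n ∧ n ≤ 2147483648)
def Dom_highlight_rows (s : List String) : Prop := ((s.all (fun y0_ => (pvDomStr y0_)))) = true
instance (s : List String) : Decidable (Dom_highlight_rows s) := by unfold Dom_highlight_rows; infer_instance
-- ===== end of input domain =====

-- B builds the styles as three positional constant blocks instead of A's per-index conditional loop (objective: simpler).

-- ===== PORT A =====
def highlight_rows (s : List String) : List String :=
  (PySem.List.pyRange 0 (s.length : Int) 1).foldl
    (fun styles i =>
      if i < 6 then styles ++ ["background-color: rgba(93, 178, 48, 0.3);"]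
      else if i ≥ (s.length : Int) - 4 then styles ++ ["background-color: rgba(243, 9, 9, 0.3)"]
      else styles ++ [""]) []

-- ===== PORT B =====
-- Python's `lst * k` with k ≤ 0 is []; Int.toNat clamps negatives to 0 the same way.
def highlight_rows_alt (s : List String) : List String :=
  let n : Int := s.length
  List.replicate (min 6 n).toNat "background-color: rgba(93, 178, 48, 0.3);"
    ++ List.replicate (n - 10).toNat ""
    ++ List.replicate (n - max 6 (n - 4)).toNat "background-color: rgba(243, 9, 9, 0.3)"

-- ===== PRECONDITION & SPEC =====
def Spec_highlight_rows (s : List String) (out : List String) : Prop := out = highlight_rows_alt s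
instance (s : List String) (out : List String) : Decidable (Spec_highlight_rows s out) := by unfold Spec_highlight_rows; infer_instance

-- ===== CLAIM (what is proved, stated in full; the proofs are below) =====
def Claim_equal_highlight_rows : Prop := ∀ (s : List String), Dom_highlight_rows s → Spec_highlight_rows s (highlight_rows s)

-- ===== LEMMAS AND PROOFS =====

theorem highlight_rows_eq_map (s : List String) :
    highlight_rows s = (List.range s.length).map (fun k =>
      if k < 6 then "background-color: rgba(93, 178, 48, 0.3);"
      else if s.length ≤ k + 4 then "background-color: rgba(243, 9, 9, 0.3)"
      else "") := by
  unfold highlight_rows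
  have h : (fun (styles : List String) (i : Int) =>
      if i < 6 then styles ++ ["background-color: rgba(93, 178, 48, 0.3);"]
      else if i ≥ (s.length : Int) - 4 then styles ++ ["background-color: rgba(243, 9, 9, 0.3)"]
      else styles ++ [""]) = (fun styles i => styles ++
        [if i < 6 then "background-color: rgba(93, 178, 48, 0.3);"
         else if i ≥ (s.length : Int) - 4 then "background-color: rgba(243, 9, 9, 0.3)"
         else ""]) := by
    funext styles i; split_ifs <;> rfl
  rw [h, PySem.List.foldl_append_singleton_eq_map, PySem.List.pyRange_one, List.map_map,
    List.nil_append]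
  refine List.map_congr_left ?_
  intro k hk
  simp only [Function.comp_apply, zero_add]
  split_ifs <;> first | rfl | omega

-- ===== VERDICT (by name: the statement is the Claim_ definition above) =====
theorem highlight_rows_spec : Claim_equal_highlight_rows := by
  intro s _
  unfold Spec_highlight_rows
  rw [highlight_rows_eq_map]
  simp only [highlight_rows_alt]
  apply List.ext_getElem
  · simp; omega
  · intro i h1 h2
    simp only [List.length_map, List.length_range, List.length_append,
      List.length_replicate] at h1 h2
    simp only [List.getElem_map, List.getElem_range, List.getElem_append,
      List.getElem_replicate, List.length_replicate, List.length_append]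
    split_ifs <;> first | rfl | omega
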